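-- pv_equiv track=rewrite | github.com/j-brent/arc-diagrams | substring.py | matching_substring_pairs
-- ===== SOURCE A (Python) =====
-- def maximal_matching_pair( s, substring_length, old_index=-1 ):
--     '''
--     find the first pair of matching substrings at least as long as the specified length
--     '''
--     if substring_length > len(s)/2:
--         return (lensubstring_lengthgth, -1) # fail- futile to keep searching with this string
--
--     head = s[:substring_length]
--     tail = s[substring_length:]
--     index = tail.find(head)
--     if index == -1:
--         if substring_length > 2:
--             return (substring_length-1, old_index) # success
--         return (substring_length, index) # fail- failed on first 2 character substring attempt
--
--     return maximal_matching_pair(s, substring_length+1, index) # keep looking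
--
-- def first_matching_substring_pair( s, start=0 ):
--     '''
--     returns the first matching substring pair of at least length 2 in the given string,
--     ignoring all characters of the string before the given start index
--     '''
--     if start < 0:
--         return () # invalid input: start must be non-negative
--
--     if len(s[start:]) < 4:
--         return () # fail: string too short to find matching substrings of minimal length 2
--
--     minimal_substring_length = 2
--     (length, distance) = maximal_matching_pair(s[start:], minimal_substring_length)
--     if distance != -1:
--         return (start, length, distance) # success
--
--     return first_matching_substring_pair(s, start+1) # keep looking
--
-- def matching_substring_pairs( string ):
--     '''
--     returns a collection of consecutive substring pairs encoded as (start, length, distance) where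
--     * start is the index of the first character of the first substring of the matching substring pair,
--     * length is the length of the substrings in the matching substring pair, and
--     * distance is the distance from the end of the first substring to the begining of the second substring
--     '''
--     pairs = []
--     pair = first_matching_substring_pair(string, 0)
--     while pair:
--         pairs.append(pair)
--         (start, length, distance) = pair
--         pair = first_matching_substring_pair(string, start+length)
--     return pairs
-- ===== SOURCE B (Python) =====
-- def matching_substring_pairs(string):
--     """Single-function iterative reimplementation: one outer loop over start
--     positions with an inner upward scan extending the matched prefix length
--     (a prefix longer than half the remaining string cannot recur)."""
--     pairs = []
--     n = len(string)
--     start = 0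
--     while start <= n - 4:
--         t = string[start:]
--         length = 2
--         dist = t[2:].find(t[:2])
--         if dist == -1:
--             start += 1
--             continue
--         while 2 * (length + 1) <= len(t):
--             nxt = t[length + 1:].find(t[:length + 1])
--             if nxt == -1:
--                 break
--             length += 1
--             dist = nxt
--         pairs.append((start, length, dist))
--         start += length
--     return pairs
-- ===== Notes on version B (the rewrite author's own statement) =====
-- stated objective: simpler
-- what changed: A's two mutually-feeding recursive helpers are inlined into one function with an explicit outer loop over start positions and an inner upward scan that extends the matched prefix length, with an explicit half-length bound instead of A's broken bound check; Pre_ excludes exactly the inputs on which A raises NameError at its undefined-name line.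
import Mathlib
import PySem

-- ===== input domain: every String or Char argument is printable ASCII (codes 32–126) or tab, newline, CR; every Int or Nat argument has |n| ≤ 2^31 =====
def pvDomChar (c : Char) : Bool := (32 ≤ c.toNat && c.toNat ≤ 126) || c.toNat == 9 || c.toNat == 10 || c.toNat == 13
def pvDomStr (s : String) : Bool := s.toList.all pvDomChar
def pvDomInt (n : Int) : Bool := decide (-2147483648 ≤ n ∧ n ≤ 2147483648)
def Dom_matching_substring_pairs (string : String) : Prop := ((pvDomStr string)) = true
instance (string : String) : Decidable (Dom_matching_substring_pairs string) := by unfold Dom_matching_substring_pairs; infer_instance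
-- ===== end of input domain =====

-- B inlines A's two recursive helpers into one iterative double loop (no behaviour change
-- on Pre_); Pre_ excludes exactly the inputs on which A raises NameError.


-- ===== PORT A =====
-- maximal_matching_pair(s, substring_length, old_index).  Python's float test
-- 'substring_length > len(s)/2' is exactly '2*l > len' on ints (division by 2 is exact in
-- binary floating point for |len| ≤ 2^31).  Where Python reaches the line
-- 'return (lensubstring_lengthgth, -1)' it raises NameError; the port returns the dummy
-- (0, -1) there — those inputs are excluded by Pre_matching_substring_pairs.
-- termination measures, factored out so the definitions stay small
lemma pvToNat_lt (a b : Int) (h1 : a < b) (h2 : 0 < b) : a.toNat < b.toNat :=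
  (Int.toNat_lt_toNat h2).mpr h1

lemma pvMmpA_dec (m l : Int) (h : ¬ 2 * l > m) :
    (2 + m - 2 * (l + 1)).toNat < (2 + m - 2 * l).toNat := by
  refine pvToNat_lt _ _ ?_ ?_
  · refine sub_lt_sub_left ?_ (2 + m)
    calc 2 * l < 2 * l + 2 := lt_add_of_pos_right _ two_pos
    _ = 2 * (l + 1) := (mul_add_one 2 l).symm
  · have h1 : 0 ≤ m - 2 * l := sub_nonneg.mpr (Int.not_lt.mp h)
    calc (0 : Int) < 2 := two_pos
    _ ≤ 2 + (m - 2 * l) := le_add_of_nonneg_right h1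
    _ = 2 + m - 2 * l := (add_sub_assoc 2 m (2 * l)).symm

def pvMmpA (t : List Char) (l old : Int) : Int × Int :=
  if 2 * l > (t.length : Int) then (0, -1)
  else
    let head := PySem.List.slice t none (some l)
    let tail := PySem.List.slice t (some l) none
    let index := PySem.Chars.find tail head
    if index = -1 then
      if l > 2 then (l - 1, old)
      else (l, index)
    else pvMmpA t (l + 1) index
termination_by (2 + (t.length : Int) - 2 * l).toNat
decreasing_by exact pvMmpA_dec _ l (by assumption)

lemma pvFirstA_dec (s : List Char) (start : Int) (h0 : 0 ≤ start)
    (hlen : ¬ (((PySem.List.slice s (some start) none).length : Nat) : Int) < 4) :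
    ((s.length : Int) - (start + 1)).toNat < ((s.length : Int) - start).toNat := by
  rw [PySem.List.slice_from s h0, List.length_drop] at hlen
  have h4 : (4 : Int) ≤ ((s.length - start.toNat : Nat) : Int) := Int.not_lt.mp hlen
  have hk : start.toNat ≤ s.length := by
    refine Nat.le_of_lt (Nat.lt_of_sub_pos ?_)
    exact_mod_cast lt_of_lt_of_le (by norm_num : (0 : Int) < 4) h4
  have heq : ((s.length - start.toNat : Nat) : Int) = (s.length : Int) - start := by
    rw [Int.natCast_sub hk, Int.toNat_of_nonneg h0]
  rw [heq] at h4
  refine pvToNat_lt _ _ (sub_lt_sub_left (lt_add_one start) _) ?_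
  exact lt_of_lt_of_le (by norm_num : (0 : Int) < 4) h4

-- first_matching_substring_pair(s, start)
def pvFirstA (s : List Char) (start : Int) : Option (Int × Int × Int) :=
  if start < 0 then none
  else
    let t := PySem.List.slice s (some start) none
    if (t.length : Int) < 4 then none
    else
      let r := pvMmpA t 2 (-1)
      if r.2 ≠ -1 then some (start, r.1, r.2)
      else pvFirstA s (start + 1)
termination_by ((s.length : Int) - start).toNat
decreasing_by exact pvFirstA_dec s start (by omega) (by assumption)

-- matching_substring_pairs' while loop (pair recomputed at each loop head).
-- The fuel argument is only a totality guard: each iteration moves start forward by at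
-- least 1, so fuel = len + 1 (as passed below) is never exhausted (proved in pvLoops_eq).
def pvLoopA : List Char → Nat → Int → List (Int × Int × Int) → List (Int × Int × Int)
  | _, 0, _, pairs => pairs
  | s, fuel + 1, start, pairs =>
    match pvFirstA s start with
    | none => pairs
    | some (st, l, d) => pvLoopA s fuel (st + l) (pairs ++ [(st, l, d)])

def matching_substring_pairs (string : String) : List (Int × Int × Int) :=
  pvLoopA string.toList (string.toList.length + 1) 0 []

-- ===== PORT B =====
-- the inner 'while 2*(length+1) <= len(t): nxt = t[length+1:].find(t[:length+1]); …' loop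
lemma pvExtendB_dec (m l : Int) (h : 2 * (l + 1) ≤ m) :
    (m - 2 * (l + 1)).toNat < (m - 2 * l).toNat := by
  have h2 : 2 * l < 2 * (l + 1) := by
    calc 2 * l < 2 * l + 2 := lt_add_of_pos_right _ two_pos
    _ = 2 * (l + 1) := (mul_add_one 2 l).symm
  exact pvToNat_lt _ _ (sub_lt_sub_left h2 m) (sub_pos.mpr (lt_of_lt_of_le h2 h))

def pvExtendB (t : List Char) (length dist : Int) : Int × Int :=
  if 2 * (length + 1) ≤ (t.length : Int) then
    let nxt := PySem.Chars.find (PySem.List.slice t (some (length + 1)) none)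
                                (PySem.List.slice t none (some (length + 1)))
    if nxt = -1 then (length, dist)
    else pvExtendB t (length + 1) nxt
  else (length, dist)
termination_by ((t.length : Int) - 2 * length).toNat
decreasing_by exact pvExtendB_dec _ length (by assumption)

-- the outer 'while start <= n - 4' loop of Source B (fuel: totality guard only, as above)
def pvLoopB : List Char → Nat → Int → List (Int × Int × Int) → List (Int × Int × Int)
  | _, 0, _, pairs => pairs
  | s, fuel + 1, start, pairs =>
    if start ≤ (s.length : Int) - 4 then
      let t := PySem.List.slice s (some start) none
      let dist := PySem.Chars.find (PySem.List.slice t (some 2) none)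
                                   (PySem.List.slice t none (some 2))
      if dist = -1 then pvLoopB s fuel (start + 1) pairs
      else
        let r := pvExtendB t 2 dist
        pvLoopB s fuel (start + r.1) (pairs ++ [(start, r.1, r.2)])
    else pairs

def matching_substring_pairs_alt (string : String) : List (Int × Int × Int) :=
  pvLoopB string.toList (string.toList.length + 1) 0 []

-- ===== PRECONDITION & SPEC =====
-- helpers for Pre_: per-start closed-form tests and the arithmetic chain of start
-- positions A's outer scan visits (start + 1 on failure, start + found length on success)
-- 'the prefix of length l of t does NOT recur in the rest of t'
def pvFails (t : List Char) (l : Nat) : Bool :=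
  PySem.Chars.find (t.drop l) (t.take l) == -1
-- 'every prefix of t of length 2..len/2 recurs later in t' — on such a suffix A's inner
-- search escalates past half the length and hits the undefined name (NameError)
def pvBadSuffix (t : List Char) : Bool :=
  (List.range (t.length + 1)).all fun l =>
    decide (l < 2) || decide (2 * l > t.length) || !(pvFails t l)
-- the least l ≥ 2 whose prefix does not recur; A's found pair there has length l - 1
def pvMinFail (t : List Char) : Nat :=
  ((List.range (t.length + 1)).find? (fun l => decide (2 ≤ l) && pvFails t l)).getD 0
-- does A's scan, started at position st, reach a bad suffix?  (fuel = length + 1 suffices: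
-- each step advances st by at least 1)
def pvCrashChain (s : List Char) : Nat → Nat → Bool
  | 0, _ => false
  | fuel + 1, st =>
    if s.length < st + 4 then false
    else if pvBadSuffix (s.drop st) then true
    else if pvFails (s.drop st) 2 then pvCrashChain s fuel (st + 1)
    else pvCrashChain s fuel (st + (pvMinFail (s.drop st) - 1))

-- Pre_ excludes exactly the strings on which A raises NameError: those whose scan reaches
-- a start position whose suffix repeats every one of its prefixes up to half its length.
def Pre_matching_substring_pairs (string : String) : Prop :=
  pvCrashChain string.toList (string.toList.length + 1) 0 = false
instance (string : String) : Decidable (Pre_matching_substring_pairs string) := by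
  unfold Pre_matching_substring_pairs; infer_instance

def pvWitness_matching_substring_pairs : String := "abcd"

def Spec_matching_substring_pairs (string : String) (out : List (Int × Int × Int)) : Prop := out = matching_substring_pairs_alt string
instance (string : String) (out : List (Int × Int × Int)) : Decidable (Spec_matching_substring_pairs string out) := by unfold Spec_matching_substring_pairs; infer_instance

-- ===== CLAIM (what is proved, stated in full; the proofs are below) =====
def Claim_equal_matching_substring_pairs : Prop := ∀ (string : String), Dom_matching_substring_pairs string → Pre_matching_substring_pairs string → Spec_matching_substring_pairs string (matching_substring_pairs string)

-- ===== LEMMAS AND PROOFS =====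

-- from 'the suffix is not bad' extract a failing prefix length within half the length
lemma pvBad_false (t : List Char) (h : pvBadSuffix t = false) :
    ∃ k : Nat, 2 ≤ k ∧ 2 * k ≤ t.length ∧
      PySem.Chars.find (t.drop k) (t.take k) = -1 := by
  by_contra hc
  push Not at hc
  have : pvBadSuffix t = true := by
    unfold pvBadSuffix
    rw [List.all_eq_true]
    intro l hl
    by_cases h2 : l < 2
    · simp [h2]
    · by_cases hm : 2 * l > t.length
      · simp [hm]
      · have := hc l (by omega) (by omega)
        simp [pvFails, this, h2, hm]
  rw [this] at h; exact absurd h (by decide)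

-- find? over a contiguous range returns the least satisfying element
lemma pvFind?_range' (p : Nat → Bool) (k : Nat) :
    ∀ (a n : Nat), a ≤ k → k < a + n → p k = true → (∀ i, a ≤ i → i < k → p i = false) →
      (List.range' a n).find? p = some k := by
  intro a n
  induction n generalizing a with
  | zero => intro h1 h2; omega
  | succ n ih =>
      intro h1 h2 hk hmin
      rw [List.range'_succ, List.find?_cons]
      by_cases ha : a = k
      · subst ha; rw [hk]
      · have : p a = false := hmin a le_rfl (by omega)
        rw [this]
        exact ih (a + 1) (by omega) (by omega) hk (fun i hi1 hi2 => hmin i (by omega) hi2)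

lemma pvFind?_range (p : Nat → Bool) (k m : Nat) (hk : k < m) (hpk : p k = true)
    (hmin : ∀ i, i < k → p i = false) : (List.range m).find? p = some k := by
  rw [List.range_eq_range']
  exact pvFind?_range' p k 0 m (Nat.zero_le k) (by omega) hpk (fun i _ hi => hmin i hi)

lemma pvMinFail_eq (t : List Char) (k : Nat) (hk2 : 2 ≤ k) (hkm : k ≤ t.length)
    (hf : pvFails t k = true) (hmin : ∀ i, 2 ≤ i → i < k → pvFails t i = false) :
    pvMinFail t = k := by
  unfold pvMinFail
  rw [pvFind?_range _ k (t.length + 1) (by omega) (by simp [hk2, hf])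
    (fun i hi => by
      by_cases h2 : 2 ≤ i
      · simp [hmin i h2 hi]
      · simp [h2])]
  rfl

-- the extended length never shrinks
lemma pvExtendB_fst (t : List Char) (l d : Int) : l ≤ (pvExtendB t l d).1 := by
  induction l, d using pvExtendB.induct (t := t) with
  | case1 l d hle nxt hnxt =>
      rw [pvExtendB, if_pos hle]; simp only [nxt] at hnxt; rw [if_pos hnxt]
  | case2 l d hle nxt hnxt ih =>
      simp only [nxt] at hnxt
      rw [pvExtendB, if_pos hle, if_neg hnxt]
      simp only [nxt] at ih
      exact le_trans (le_of_lt (lt_add_one l)) ih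
  | case3 l d hle => rw [pvExtendB, if_neg hle]

lemma pvExtendB_snd (t : List Char) (l d : Int) (hd : d ≠ -1) : (pvExtendB t l d).2 ≠ -1 := by
  induction l, d using pvExtendB.induct (t := t) with
  | case1 l d hle nxt hnxt => rw [pvExtendB, if_pos hle]; simp only [nxt] at hnxt; rw [if_pos hnxt]; exact hd
  | case2 l d hle nxt hnxt ih =>
      simp only [nxt] at hnxt
      rw [pvExtendB, if_pos hle, if_neg hnxt]
      exact ih hnxt
  | case3 l d hle => rw [pvExtendB, if_neg hle]; exact hd

-- the length B finds is (least non-recurring prefix length) - 1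
lemma pvExtendB_minFail (t : List Char)
    (hnr : ∃ k : Nat, 2 ≤ k ∧ 2 * k ≤ t.length ∧ pvFails t k = true) :
    ∀ (n j : Nat) (d : Int), 2 ≤ j →
      (∀ i : Nat, 2 ≤ i → i ≤ j → pvFails t i = false) →
      t.length ≤ 2 * j + n →
      (pvExtendB t ((j : Nat) : Int) d).1 = ((pvMinFail t : Nat) : Int) - 1 := by
  intro n
  induction n with
  | zero =>
      intro j d hj inv hn
      obtain ⟨k, hk2, hkm, hkf⟩ := hnr
      have := inv k hk2 (by omega)
      rw [hkf] at this; exact absurd this (by decide)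
  | succ n ih =>
      intro j d hj inv hn
      by_cases hb : 2 * (j + 1) ≤ t.length
      · have hc : (((j : Nat) : Int) + 1) = (((j + 1 : Nat)) : Int) := by push_cast; ring
        rw [pvExtendB, hc]
        have hB : 2 * (((j + 1 : Nat)) : Int) ≤ (t.length : Int) := by push_cast; omega
        rw [if_pos hB,
          PySem.List.slice_from_natCast, PySem.List.slice_to_natCast]
        by_cases hfe : PySem.Chars.find (List.drop (j + 1) t) (List.take (j + 1) t) = -1
        · rw [if_pos hfe]
          have hmf : pvMinFail t = j + 1 :=
            pvMinFail_eq t (j + 1) (by omega) (by omega) (by simp [pvFails, hfe])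
              (fun i h2 hi => inv i h2 (by omega))
          rw [hmf]; push_cast; ring
        · rw [if_neg hfe]
          exact ih (j + 1) _ (by omega)
            (fun i h2 hle => by
              rcases Nat.lt_or_ge i (j + 1) with h | h
              · exact inv i h2 (by omega)
              · have hij : i = j + 1 := by omega
                rw [hij]; simp [pvFails, hfe])
            (by omega)
      · obtain ⟨k, hk2, hkm, hkf⟩ := hnr
        have hkj : k ≤ j := by omega
        have := inv k hk2 hkj
        rw [hkf] at this; exact absurd this (by decide)

lemma pvLoopA_none (s : List Char) (f : Nat) (start : Int) (acc : List (Int × Int × Int))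
    (h : pvFirstA s start = none) : pvLoopA s (f + 1) start acc = acc := by
  have e : pvLoopA s (f + 1) start acc =
      (match pvFirstA s start with
       | none => acc
       | some (st, l, d) => pvLoopA s f (st + l) (acc ++ [(st, l, d)])) := rfl
  rw [e, h]

lemma pvLoopA_some (s : List Char) (f : Nat) (start st l d : Int)
    (acc : List (Int × Int × Int)) (h : pvFirstA s start = some (st, l, d)) :
    pvLoopA s (f + 1) start acc = pvLoopA s f (st + l) (acc ++ [(st, l, d)]) := by
  have e : pvLoopA s (f + 1) start acc =
      (match pvFirstA s start with
       | none => acc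
       | some (st, l, d) => pvLoopA s f (st + l) (acc ++ [(st, l, d)])) := rfl
  rw [e, h]

lemma pvMmpA_two (t : List Char) (h4 : 4 ≤ t.length) :
    pvMmpA t 2 (-1) =
      (if PySem.Chars.find (t.drop 2) (t.take 2) = -1 then ((2 : Int), -1)
       else pvMmpA t 3 (PySem.Chars.find (t.drop 2) (t.take 2))) := by
  have e1 : PySem.List.slice t (some (2 : Int)) none = t.drop 2 := by
    have := PySem.List.slice_from t (show (0 : Int) ≤ 2 by norm_num); simpa using this
  have e2 : PySem.List.slice t none (some (2 : Int)) = t.take 2 := by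
    have := PySem.List.slice_to t (show (0 : Int) ≤ 2 by norm_num); simpa using this
  rw [pvMmpA, if_neg (by push_cast; omega), e1, e2]
  by_cases hf : PySem.Chars.find (t.drop 2) (t.take 2) = -1
  · rw [if_pos hf, if_pos hf, if_neg (by norm_num), hf]
  · rw [if_neg hf, if_neg hf]
    norm_num

lemma pvInner_eq (t : List Char)
    (hnr : ∃ k : Nat, 2 ≤ k ∧ 2 * k ≤ t.length ∧
        PySem.Chars.find (t.drop k) (t.take k) = -1) :
    ∀ (n j : Nat) (d : Int), 2 ≤ j →
      (∀ i : Nat, 2 ≤ i → i ≤ j → PySem.Chars.find (t.drop i) (t.take i) ≠ -1) →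
      t.length ≤ 2 * j + n →
      pvMmpA t ((j : Int) + 1) d = pvExtendB t ((j : Int)) d := by
  intro n
  induction n with
  | zero =>
      intro j d hj inv hn
      obtain ⟨k, hk2, hkm, hkf⟩ := hnr
      exact absurd hkf (inv k hk2 (by omega))
  | succ n ih =>
      intro j d hj inv hn
      by_cases hb : 2 * (j + 1) ≤ t.length
      · have hc : ((j : Int) + 1) = (((j + 1 : Nat)) : Int) := by push_cast; ring
        rw [pvMmpA, pvExtendB, hc]
        have hA : ¬ (2 * (((j + 1 : Nat)) : Int) > (t.length : Int)) := by push_cast; omega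
        have hB : 2 * (((j + 1 : Nat)) : Int) ≤ (t.length : Int) := by push_cast; omega
        rw [if_neg hA, if_pos hB, PySem.List.slice_from_natCast, PySem.List.slice_to_natCast]
        by_cases hfe : PySem.Chars.find (List.drop (j + 1) t) (List.take (j + 1) t) = -1
        · rw [if_pos hfe, if_pos hfe, if_pos (show (((j + 1 : Nat)) : Int) > 2 by push_cast; omega)]
          simp only [Prod.mk.injEq]
          constructor
          · push_cast; ring
          · trivial
        · rw [if_neg hfe, if_neg hfe]
          exact ih (j + 1)
            (PySem.Chars.find (List.drop (j + 1) t) (List.take (j + 1) t))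
            (by omega)
            (fun i h2 hle => by
              rcases Nat.lt_or_ge i (j + 1) with h | h
              · exact inv i h2 (by omega)
              · have hij : i = j + 1 := by omega
                rw [hij]; exact hfe)
            (by omega)
      · obtain ⟨k, hk2, hkm, hkf⟩ := hnr
        exact absurd hkf (inv k hk2 (by omega))

lemma pvLoopA_stop (s : List Char) (f : Nat) (start : Int) (acc : List (Int × Int × Int))
    (h0 : 0 ≤ start) (hs : (s.length : Int) < start + 4) : pvLoopA s f start acc = acc := by
  cases f with
  | zero => rfl
  | succ f =>
      have ht : PySem.List.slice s (some start) none = List.drop start.toNat s :=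
        PySem.List.slice_from s h0
      have hfa : pvFirstA s start = none := by
        rw [pvFirstA, if_neg (by omega), ht, if_pos (by simp [List.length_drop]; omega)]
      exact pvLoopA_none s f start acc hfa

lemma pvLoopB_stop (s : List Char) (f : Nat) (start : Int) (acc : List (Int × Int × Int))
    (hs : ¬ start ≤ (s.length : Int) - 4) : pvLoopB s f start acc = acc := by
  cases f with
  | zero => rfl
  | succ f => rw [pvLoopB, if_neg hs]

lemma pvLoops_eq (s : List Char) :
    ∀ (n fa fb : Nat) (start : Int) (acc : List (Int × Int × Int)), 0 ≤ start →
      (s.length : Int) + 1 ≤ start + n → n ≤ fa → n ≤ fb →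
      pvCrashChain s n start.toNat = false →
      pvLoopA s fa start acc = pvLoopB s fb start acc := by
  intro n
  induction n with
  | zero =>
      intro fa fb start acc h0 hn _ _ _
      rw [pvLoopA_stop s fa start acc h0 (by omega), pvLoopB_stop s fb start acc (by omega)]
  | succ n ih =>
      intro fa fb start acc h0 hn hfuelA hfuelB hcr
      by_cases hshort : (s.length : Int) < start + 4
      · rw [pvLoopA_stop s fa start acc h0 hshort, pvLoopB_stop s fb start acc (by omega)]
      · obtain ⟨fa', rfl⟩ : ∃ m, fa = m + 1 := ⟨fa - 1, by omega⟩
        obtain ⟨fb', rfl⟩ : ∃ m, fb = m + 1 := ⟨fb - 1, by omega⟩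
        have ht : PySem.List.slice s (some start) none = List.drop start.toNat s :=
          PySem.List.slice_from s h0
        have h4 : start.toNat + 4 ≤ s.length := by omega
        -- unpack the crash-chain hypothesis one step
        rw [pvCrashChain, if_neg (by omega)] at hcr
        have hbad : pvBadSuffix (s.drop start.toNat) = false := by
          by_contra hb
          rw [Bool.not_eq_false] at hb
          rw [if_pos hb] at hcr
          exact absurd hcr (by decide)
        rw [if_neg (by simp [hbad])] at hcr
        have e1 : ∀ u : List Char, PySem.List.slice u (some (2 : Int)) none = u.drop 2 := by
          intro u
          have := PySem.List.slice_from u (show (0 : Int) ≤ 2 by norm_num)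
          simpa using this
        have e2 : ∀ u : List Char, PySem.List.slice u none (some (2 : Int)) = u.take 2 := by
          intro u
          have := PySem.List.slice_to u (show (0 : Int) ≤ 2 by norm_num)
          simpa using this
        have hlen4 : 4 ≤ (List.drop start.toNat s).length := by
          rw [List.length_drop]; omega
        by_cases hd0 : PySem.Chars.find ((List.drop start.toNat s).drop 2)
            ((List.drop start.toNat s).take 2) = -1
        · -- no pair at this start: both sides move to start + 1
          rw [if_pos (by unfold pvFails; rw [hd0]; decide)] at hcr
          have hcr1 : pvCrashChain s n (start + 1).toNat = false := by
            have : (start + 1).toNat = start.toNat + 1 := by omega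
            rw [this]; exact hcr
          have hr2 : pvMmpA (List.drop start.toNat s) 2 (-1) = ((2 : Int), -1) := by
            rw [pvMmpA_two _ hlen4, if_pos hd0]
          have hfa1 : pvFirstA s start = pvFirstA s (start + 1) := by
            rw [pvFirstA, if_neg (by omega), ht, if_neg (by simp [List.length_drop]; omega),
              hr2]
            simp
          have hstep : pvLoopA s (fa' + 1) start acc = pvLoopA s (fa' + 1) (start + 1) acc := by
            cases hv : pvFirstA s (start + 1) with
            | none =>
                rw [pvLoopA_none s fa' start acc (hfa1.trans hv),
                  pvLoopA_none s fa' (start + 1) acc hv]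
            | some p =>
                obtain ⟨st, l, d⟩ := p
                rw [pvLoopA_some s fa' start st l d acc (hfa1.trans hv),
                  pvLoopA_some s fa' (start + 1) st l d acc hv]
          have hBstep : pvLoopB s (fb' + 1) start acc = pvLoopB s fb' (start + 1) acc := by
            conv_lhs => rw [pvLoopB]
            rw [if_pos (show start ≤ (s.length : Int) - 4 by omega)]
            simp only [ht, e1, e2]
            rw [if_pos hd0]
          exact (hstep.trans
            (ih (fa' + 1) fb' (start + 1) acc (by omega) (by omega) (by omega) (by omega)
              hcr1)).trans hBstep.symm
        · -- a pair starts here: the inner searches agree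
          rw [if_neg (by unfold pvFails; simp only [beq_iff_eq]; exact hd0)] at hcr
          obtain ⟨k, hk2, hkm, hkf⟩ := pvBad_false _ hbad
          have hnrB : ∃ k : Nat, 2 ≤ k ∧ 2 * k ≤ (List.drop start.toNat s).length ∧
              pvFails (List.drop start.toNat s) k = true :=
            ⟨k, hk2, hkm, by unfold pvFails; rw [hkf]; decide⟩
          have hinner : pvMmpA (List.drop start.toNat s) 2 (-1) =
              pvExtendB (List.drop start.toNat s) 2
                (PySem.Chars.find ((List.drop start.toNat s).drop 2)
                  ((List.drop start.toNat s).take 2)) := by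
            have h23 : ((2 : Nat) : Int) + 1 = 3 := by norm_num
            have h22 : ((2 : Nat) : Int) = 2 := by norm_num
            have := pvInner_eq (List.drop start.toNat s)
              ⟨k, hk2, hkm, hkf⟩
              (List.drop start.toNat s).length 2
              (PySem.Chars.find ((List.drop start.toNat s).drop 2)
                ((List.drop start.toNat s).take 2))
              (by norm_num)
              (fun i hi2 hile => by
                have : i = 2 := by omega
                rw [this]; exact hd0)
              (by omega)
            rw [h23, h22] at this
            rw [pvMmpA_two _ hlen4, if_neg hd0, this]
          have hsnd := pvExtendB_snd (List.drop start.toNat s) 2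
            (PySem.Chars.find ((List.drop start.toNat s).drop 2)
              ((List.drop start.toNat s).take 2)) hd0
          have hfst := pvExtendB_fst (List.drop start.toNat s) 2
            (PySem.Chars.find ((List.drop start.toNat s).drop 2)
              ((List.drop start.toNat s).take 2))
          have hmf : (pvExtendB (List.drop start.toNat s) 2
              (PySem.Chars.find ((List.drop start.toNat s).drop 2)
                ((List.drop start.toNat s).take 2))).1 =
              ((pvMinFail (List.drop start.toNat s) : Nat) : Int) - 1 := by
            have h22 : ((2 : Nat) : Int) = 2 := by norm_num
            have := pvExtendB_minFail (List.drop start.toNat s) hnrB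
              (List.drop start.toNat s).length 2
              (PySem.Chars.find ((List.drop start.toNat s).drop 2)
                ((List.drop start.toNat s).take 2))
              (by norm_num)
              (fun i hi2 hile => by
                have : i = 2 := by omega
                rw [this]; unfold pvFails; simp only [beq_eq_false_iff_ne, ne_eq]; exact hd0)
              (by omega)
            rw [h22] at this
            exact this
          have hcr1 : pvCrashChain s n
              (start + (pvExtendB (List.drop start.toNat s) 2
                (PySem.Chars.find ((List.drop start.toNat s).drop 2)
                  ((List.drop start.toNat s).take 2))).1).toNat = false := by
            have hge : (3 : Int) ≤ ((pvMinFail (List.drop start.toNat s) : Nat) : Int) := by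
              rw [hmf] at hfst; omega
            have : (start + (pvExtendB (List.drop start.toNat s) 2
                (PySem.Chars.find ((List.drop start.toNat s).drop 2)
                  ((List.drop start.toNat s).take 2))).1).toNat =
                start.toNat + (pvMinFail (List.drop start.toNat s) - 1) := by
              rw [hmf]; omega
            rw [this]; exact hcr
          have hfa1 : pvFirstA s start = some (start,
              (pvExtendB (List.drop start.toNat s) 2
                (PySem.Chars.find ((List.drop start.toNat s).drop 2)
                  ((List.drop start.toNat s).take 2))).1,
              (pvExtendB (List.drop start.toNat s) 2
                (PySem.Chars.find ((List.drop start.toNat s).drop 2)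
                  ((List.drop start.toNat s).take 2))).2) := by
            rw [pvFirstA, if_neg (by omega), ht, if_neg (by simp [List.length_drop]; omega),
              hinner]
            simp only []
            rw [if_pos hsnd]
          have hBstep : pvLoopB s (fb' + 1) start acc = pvLoopB s fb'
              (start + (pvExtendB (List.drop start.toNat s) 2
                (PySem.Chars.find ((List.drop start.toNat s).drop 2)
                  ((List.drop start.toNat s).take 2))).1)
              (acc ++ [(start,
                (pvExtendB (List.drop start.toNat s) 2
                  (PySem.Chars.find ((List.drop start.toNat s).drop 2)
                    ((List.drop start.toNat s).take 2))).1,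
                (pvExtendB (List.drop start.toNat s) 2
                  (PySem.Chars.find ((List.drop start.toNat s).drop 2)
                    ((List.drop start.toNat s).take 2))).2)]) := by
            conv_lhs => rw [pvLoopB]
            rw [if_pos (show start ≤ (s.length : Int) - 4 by omega)]
            simp only [ht, e1, e2]
            rw [if_neg hd0]
          exact ((pvLoopA_some s fa' start start _ _ acc hfa1).trans
            (ih fa' fb'
              (start + (pvExtendB (List.drop start.toNat s) 2
                (PySem.Chars.find ((List.drop start.toNat s).drop 2)
                  ((List.drop start.toNat s).take 2))).1)
              (acc ++ [(start,
                (pvExtendB (List.drop start.toNat s) 2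
                  (PySem.Chars.find ((List.drop start.toNat s).drop 2)
                    ((List.drop start.toNat s).take 2))).1,
                (pvExtendB (List.drop start.toNat s) 2
                  (PySem.Chars.find ((List.drop start.toNat s).drop 2)
                    ((List.drop start.toNat s).take 2))).2)])
              (by omega) (by omega) (by omega) (by omega) hcr1)).trans hBstep.symm

theorem matching_substring_pairs_spec : Claim_equal_matching_substring_pairs := by
  intro str hdom hpre
  unfold Spec_matching_substring_pairs matching_substring_pairs matching_substring_pairs_alt
  refine pvLoops_eq str.toList (str.toList.length + 1) _ _ 0 [] le_rfl (by omega) le_rfl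
    le_rfl ?_
  exact hpre
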